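-- pv_equiv track=rewrite | github.com/Hassan-Sarwat/Harvey | backend/app/agents/playbook_checker.py | _approximate_original_offset
-- ===== SOURCE A (Python) =====
-- def _approximate_original_offset(text: str, compact_index: int) -> int:
--     compact_seen = 0
--     in_space = False
--     for index, char in enumerate(text):
--         if char.isspace():
--             if not in_space:
--                 if compact_seen >= compact_index:
--                     return index
--                 compact_seen += 1
--             in_space = True
--             continue
--         in_space = False
--         if compact_seen >= compact_index:
--             return index
--         compact_seen += 1
--     return 0
-- ===== SOURCE B (Python) =====
-- def _approximate_original_offset(text: str, compact_index: int) -> int: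
--     offsets = []
--     in_space = False
--     for index, char in enumerate(text):
--         if char.isspace():
--             if not in_space:
--                 offsets.append(index)
--             in_space = True
--         else:
--             in_space = False
--             offsets.append(index)
--     if 0 <= compact_index < len(offsets):
--         return offsets[compact_index]
--     return 0
-- ===== Notes on version B (the rewrite author's own statement) =====
-- stated objective: alternative
-- what changed: B precomputes a table of original offsets for every compact position in one pass with no early return, then answers with a guarded O(1) table lookup, instead of A's scan-until-target with an early return inside the loop.
import Mathlib
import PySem

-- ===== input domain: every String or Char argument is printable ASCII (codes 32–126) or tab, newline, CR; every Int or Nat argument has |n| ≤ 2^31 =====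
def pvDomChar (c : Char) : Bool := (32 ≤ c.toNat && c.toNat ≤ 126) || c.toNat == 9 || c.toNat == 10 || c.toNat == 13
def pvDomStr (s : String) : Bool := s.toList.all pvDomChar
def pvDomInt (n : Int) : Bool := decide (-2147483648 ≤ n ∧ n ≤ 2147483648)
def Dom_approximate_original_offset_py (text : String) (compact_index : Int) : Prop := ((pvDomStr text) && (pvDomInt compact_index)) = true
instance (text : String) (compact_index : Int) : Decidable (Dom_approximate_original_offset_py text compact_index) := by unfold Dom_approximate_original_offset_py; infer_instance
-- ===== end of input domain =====

-- B precomputes the full compact→original offset table in one pass (no early return)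
-- and answers with a guarded O(1) lookup; alternative decomposition, same cost.

-- ===== PORT A =====
-- A's enumerate loop: state (index, compact_seen, in_space), early return inside the loop.
def pvALoop (ci : Int) : List Char → Int → Int → Bool → Int
  | [], _, _, _ => 0
  | c :: rest, index, seen, in_space =>
    if PySem.Chars.isspace c then
      if !in_space then
        if seen ≥ ci then index
        else pvALoop ci rest (index + 1) (seen + 1) true
      else pvALoop ci rest (index + 1) seen true
    else
      if seen ≥ ci then index
      else pvALoop ci rest (index + 1) (seen + 1) false

def approximate_original_offset_py (text : String) (compact_index : Int) : Int :=
  pvALoop compact_index text.toList 0 0 false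

-- ===== PORT B =====
-- B's table-building loop: append the original index for every counted compact position.
def pvBOffsets : List Char → Int → Bool → List Int
  | [], _, _ => []
  | c :: rest, index, in_space =>
    if PySem.Chars.isspace c then
      if !in_space then index :: pvBOffsets rest (index + 1) true
      else pvBOffsets rest (index + 1) true
    else index :: pvBOffsets rest (index + 1) false

def approximate_original_offset_py_alt (text : String) (compact_index : Int) : Int :=
  let offsets := pvBOffsets text.toList 0 false
  if 0 ≤ compact_index ∧ compact_index < (offsets.length : Int) then
    PySem.List.pyGetD offsets compact_index 0
  else 0

-- ===== PRECONDITION & SPEC =====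
def Spec_approximate_original_offset_py (text : String) (compact_index : Int) (out : Int) : Prop := out = approximate_original_offset_py_alt text compact_index
instance (text : String) (compact_index : Int) (out : Int) : Decidable (Spec_approximate_original_offset_py text compact_index out) := by unfold Spec_approximate_original_offset_py; infer_instance

-- ===== CLAIM (what is proved, stated in full; the proofs are below) =====
def Claim_equal_approximate_original_offset_py : Prop := ∀ (text : String) (compact_index : Int), Dom_approximate_original_offset_py text compact_index → Spec_approximate_original_offset_py text compact_index (approximate_original_offset_py text compact_index)

-- ===== LEMMAS AND PROOFS =====

-- A's scan from state (index, seen, in_space) is a lookup at position ci - seen in B's table.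
theorem pvALoop_eq_getD (ci : Int) (cs : List Char) :
    ∀ (index seen : Int) (in_sp : Bool), seen ≤ ci →
      pvALoop ci cs index seen in_sp =
        (pvBOffsets cs index in_sp).getD (ci - seen).toNat 0 := by
  induction cs with
  | nil => intro index seen in_sp _; simp [pvALoop, pvBOffsets]
  | cons c rest ih =>
    intro index seen in_sp hle
    by_cases hs : PySem.Chars.isspace c
    · cases in_sp with
      | true => simpa [pvALoop, pvBOffsets, hs] using ih (index + 1) seen true hle
      | false =>
        by_cases h0 : seen ≥ ci
        · have : ci - seen = 0 := by omega
          simp [pvALoop, pvBOffsets, hs, h0, this]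
        · have h1 : (ci - seen).toNat = (ci - (seen + 1)).toNat + 1 := by omega
          simp only [pvALoop, pvBOffsets, hs, if_true, Bool.not_false, if_false, h0]
          rw [ih (index + 1) (seen + 1) true (by omega), h1]
          simp [List.getD]
    · by_cases h0 : seen ≥ ci
      · have : ci - seen = 0 := by omega
        simp [pvALoop, pvBOffsets, hs, h0, this]
      · have h1 : (ci - seen).toNat = (ci - (seen + 1)).toNat + 1 := by omega
        simp only [pvALoop, pvBOffsets, hs, if_false, h0]
        rw [ih (index + 1) (seen + 1) false (by omega), h1]
        simp [List.getD]

-- ===== VERDICT (by name: the statement is the Claim_ definition above) =====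
theorem approximate_original_offset_py_spec : Claim_equal_approximate_original_offset_py := by
  intro text ci _
  unfold Spec_approximate_original_offset_py approximate_original_offset_py
    approximate_original_offset_py_alt
  by_cases hneg : 0 ≤ ci
  · rw [pvALoop_eq_getD ci text.toList 0 0 false hneg]
    obtain ⟨n, rfl⟩ : ∃ n : Nat, ci = (n : Int) := ⟨ci.toNat, by omega⟩
    by_cases hlt : (n : Int) < ((pvBOffsets text.toList 0 false).length : Int)
    · simp [hlt, PySem.List.pyGetD_natCast]
    · have hlen : (pvBOffsets text.toList 0 false).length ≤ n := by omega
      simp [hlt, List.getD_eq_getElem?_getD, List.getElem?_eq_none hlen]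
  · -- negative compact_index: A returns at the very first character (index 0), or 0 on empty text
    have : ¬ (0 ≤ ci ∧ ci < ((pvBOffsets text.toList 0 false).length : Int)) := by omega
    simp only [this, if_false]
    cases h : text.toList with
    | nil => simp [pvALoop]
    | cons c rest =>
      by_cases hs : PySem.Chars.isspace c <;>
        simp [pvALoop, hs, show (0:Int) ≥ ci by omega]
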